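-- pv_equiv track=rewrite | github.com/SoraK93/dsa-gfg-full-course | DSA/Hashing/longest_consecutive_subsequence.py | longest_subsequence_naive
-- ===== SOURCE A (Python) =====
-- def longest_subsequence_naive(arr):
--     """Uses sorted() to sort the array, later traverse through the array to """
--     # Reduces random search in-order to find consecutive array
--     sorted_arr = sorted(arr)
--     # There will always be the element itself which makes up the initial consecutive count
--     result, curr_sum = 1, 1
--     for i in range(1, len(sorted_arr)):
--         if sorted_arr[i - 1] + 1 == sorted_arr[i]:
--             curr_sum += 1
--         else:
--             curr_sum = 1
--         result = max(result, curr_sum)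
--     return result
-- ===== SOURCE B (Python) =====
-- def longest_subsequence_naive(arr):
--     """Longest strictly +1-ascending segment of the sorted array, computed as
--     the largest gap between successive break positions."""
--     s = sorted(arr)
--     cuts = [0] + [i for i in range(1, len(s)) if s[i] - s[i - 1] != 1] + [len(s)]
--     return max(b - a for a, b in zip(cuts, cuts[1:]))
-- ===== Notes on version B (the rewrite author's own statement) =====
-- stated objective: alternative
-- what changed: B computes the answer as the largest gap between successive break positions of the sorted array (a break-index list, then max over adjacent cut differences) instead of A's running streak/maximum accumulator scan; Pre_ excludes the empty list, a corner where A's seeded accumulator yields 1 while B's no-segments convention yields 0 and either value is defensible.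
-- outside the precondition, e.g. on longest_subsequence_naive([]): A returns 1, B returns 0
import Mathlib
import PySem

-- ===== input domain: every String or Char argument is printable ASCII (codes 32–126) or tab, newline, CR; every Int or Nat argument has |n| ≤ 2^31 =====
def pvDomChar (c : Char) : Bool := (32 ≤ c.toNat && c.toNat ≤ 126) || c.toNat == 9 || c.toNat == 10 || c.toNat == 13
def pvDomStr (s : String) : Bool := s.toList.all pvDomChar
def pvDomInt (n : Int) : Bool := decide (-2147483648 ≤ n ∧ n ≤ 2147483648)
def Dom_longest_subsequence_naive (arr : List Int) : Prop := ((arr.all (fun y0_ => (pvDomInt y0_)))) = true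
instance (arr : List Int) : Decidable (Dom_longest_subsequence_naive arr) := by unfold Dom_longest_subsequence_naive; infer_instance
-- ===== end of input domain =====

-- B computes the answer as the largest gap between successive break positions of the
-- sorted array instead of A's running streak/maximum accumulator scan; an alternative
-- decomposition of the same O(n log n) task, proved equal on every non-empty list.

-- ===== PORT A =====
def longest_subsequence_naive (arr : List Int) : Int :=
  let sorted_arr := PySem.List.sorted arr (fun x => x) false
  (((PySem.List.pyRange 1 (sorted_arr.length : Int) 1).foldl
      (fun (st : Int × Int) i =>
        let curr_sum : Int :=
          if PySem.List.pyGetD sorted_arr (i - 1) 0 + 1 = PySem.List.pyGetD sorted_arr i 0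
          then st.2 + 1 else 1
        (max st.1 curr_sum, curr_sum)) ((1 : Int), (1 : Int))).1)

-- ===== PORT B =====
-- Source B: cuts = [0] + [i for i in range(1, len(s)) if s[i] - s[i-1] != 1] + [len(s)];
-- max(b - a for a, b in zip(cuts, cuts[1:])).  Python's max would raise on an empty
-- sequence; cuts always has ≥ 2 entries, so the .getD default is unreachable.
def longest_subsequence_naive_alt (arr : List Int) : Int :=
  let s := PySem.List.sorted arr (fun x => x) false
  let cuts : List Int :=
    [0] ++ ((PySem.List.pyRange 1 (s.length : Int) 1).filter
        (fun i => !(PySem.List.pyGetD s i 0 - PySem.List.pyGetD s (i - 1) 0 == 1)))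
      ++ [(s.length : Int)]
  ((PySem.List.max? ((cuts.zip (PySem.List.slice cuts (some 1) none)).map
      (fun p => p.2 - p.1)) (fun v => v)).getD 0)

-- ===== PRECONDITION & SPEC =====
-- Pre_ excludes only the empty list, a corner no caller specifies: A's seeded
-- accumulator returns 1 there while B's no-segments convention yields 0, and
-- either value is defensible for "longest run of an empty collection".
def Pre_longest_subsequence_naive (arr : List Int) : Prop := arr ≠ []
instance (arr : List Int) : Decidable (Pre_longest_subsequence_naive arr) := by unfold Pre_longest_subsequence_naive; infer_instance

def pvWitness_longest_subsequence_naive : List Int := [3, 1, 2, 2]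

def Spec_longest_subsequence_naive (arr : List Int) (out : Int) : Prop := out = longest_subsequence_naive_alt arr
instance (arr : List Int) (out : Int) : Decidable (Spec_longest_subsequence_naive arr out) := by unfold Spec_longest_subsequence_naive; infer_instance

-- ===== CLAIM (what is proved, stated in full; the proofs are below) =====
def Claim_equal_longest_subsequence_naive : Prop := ∀ (arr : List Int), Dom_longest_subsequence_naive arr → Pre_longest_subsequence_naive arr → Spec_longest_subsequence_naive arr (longest_subsequence_naive arr)

-- ===== LEMMAS AND PROOFS =====

-- break flags of the sorted list: one Bool per adjacent pair, true = the streak breaks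
def pvFlag (p : Int × Int) : Bool := decide (p.2 - p.1 ≠ 1)

-- the maximum segment length, read off the break flags with a partial head segment cur
def pvMg : Int → List Bool → Int
  | cur, [] => cur
  | cur, b :: r => if b then max cur (pvMg 1 r) else pvMg (cur + 1) r

-- positions of the true flags, the first flag sitting at position p
def pvBreaks : List Bool → Int → List Int
  | [], _ => []
  | b :: r, p => if b then p :: pvBreaks r (p + 1) else pvBreaks r (p + 1)

-- maximum of the gaps of a :: cuts
def pvMaxGaps : Int → List Int → Int
  | _, [] => 0
  | a, b :: r => if r = [] then b - a else max (b - a) (pvMaxGaps b r)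

-- the per-pair difference list of a :: rest
def pvGl : Int → List Int → List Int
  | _, [] => []
  | a, b :: r => (b - a) :: pvGl b r

theorem pvMaxGaps_cons (a b : Int) (r : List Int) :
    pvMaxGaps a (b :: r) = if r = [] then b - a else max (b - a) (pvMaxGaps b r) := rfl

theorem pvMg_ge (bl : List Bool) : ∀ cur : Int, cur ≤ pvMg cur bl := by
  induction bl with
  | nil => intro cur; simp [pvMg]
  | cons b r ih =>
      intro cur
      simp only [pvMg]
      have := ih (cur + 1)
      split_ifs <;> omega

-- A's fold over the flags computes max res (pvMg cur bl)
theorem pvL1 (bl : List Bool) : ∀ (res cur : Int), 1 ≤ cur → cur ≤ res →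
    (bl.foldl (fun (st : Int × Int) b =>
        let c : Int := if b then 1 else st.2 + 1
        (max st.1 c, c)) (res, cur)).1 = max res (pvMg cur bl) := by
  induction bl with
  | nil => intro res cur h1 h2; simp [pvMg]; omega
  | cons b r ih =>
      intro res cur h1 h2
      simp only [List.foldl, pvMg]
      have hg1 := pvMg_ge r 1
      have hg := pvMg_ge r (cur + 1)
      cases b with
      | true =>
          rw [if_pos rfl, if_pos rfl]
          rw [ih (max res 1) 1 (by omega) (by omega)]
          omega
      | false =>
          rw [if_neg (by simp), if_neg (by simp)]
          rw [ih (max res (cur + 1)) (cur + 1) (by omega) (by omega)]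
          omega

-- the break-position reading of pvMg
theorem pvL2 (bl : List Bool) : ∀ (l p : Int),
    pvMg (p - l) bl = pvMaxGaps l (pvBreaks bl p ++ [p + (bl.length : Int)]) := by
  induction bl with
  | nil => intro l p; simp [pvMg, pvBreaks, pvMaxGaps]
  | cons b r ih =>
      intro l p
      have hlen : p + (((b :: r).length : Nat) : Int) = (p + 1) + ((r.length : Nat) : Int) := by
        push_cast [List.length_cons]; omega
      rw [hlen]
      cases b with
      | true =>
          have h1 : pvMg (p - l) (true :: r) = max (p - l) (pvMg 1 r) := by simp [pvMg]
          have h2 : pvBreaks (true :: r) p = p :: pvBreaks r (p + 1) := by simp [pvBreaks]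
          rw [h1, h2, List.cons_append, pvMaxGaps_cons]
          rw [if_neg (by simp)]
          have := ih p (p + 1)
          rw [show (p : Int) + 1 - p = 1 by omega] at this
          rw [this]
      | false =>
          have h1 : pvMg (p - l) (false :: r) = pvMg (p - l + 1) r := by simp [pvMg]
          have h2 : pvBreaks (false :: r) p = pvBreaks r (p + 1) := by simp [pvBreaks]
          rw [h1, h2]
          have := ih l (p + 1)
          rw [show (p : Int) + 1 - l = p - l + 1 by omega] at this
          rw [this]

-- the filtered range is pvBreaks of the flag list
theorem pvFilterBreaks (bl : List Bool) : ∀ (p : Int) (g : Int → Bool),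
    (∀ k : Nat, (hk : k < bl.length) → g (p + k) = bl[k]) →
    (PySem.List.pyRange p (p + (bl.length : Int)) 1).filter g = pvBreaks bl p := by
  induction bl with
  | nil =>
      intro p g _
      have h0 : p + ((([] : List Bool).length : Nat) : Int) = p := by simp
      rw [h0, PySem.List.pyRange_one_eq_nil (by omega)]
      rfl
  | cons b r ih =>
      intro p g hg
      have hcons : PySem.List.pyRange p (p + (((b :: r).length : Nat) : Int)) 1
          = p :: PySem.List.pyRange (p + 1) (p + (((b :: r).length : Nat) : Int)) 1 :=
        PySem.List.pyRange_one_cons (by push_cast [List.length_cons]; omega)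
      have hlen : p + (((b :: r).length : Nat) : Int) = (p + 1) + ((r.length : Nat) : Int) := by
        push_cast [List.length_cons]; omega
      have hgp : g p = b := by
        have := hg 0 (by simp)
        simpa using this
      have hrec := ih (p + 1) g (by
        intro k hk
        have h := hg (k + 1) (by simp only [List.length_cons]; omega)
        have harg : p + (((k + 1 : Nat)) : Int) = p + 1 + (k : Int) := by push_cast; omega
        rw [harg] at h
        simpa using h)
      rw [hcons, hlen, List.filter_cons, hgp]
      cases b <;> simp [pvBreaks, hrec]

-- zip with the tail yields the difference list
theorem pvZipGl (rest : List Int) : ∀ a : Int,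
    (((a :: rest).zip rest).map (fun p : Int × Int => p.2 - p.1)) = pvGl a rest := by
  induction rest with
  | nil => intro a; rfl
  | cons b r ih =>
      intro a
      simp only [List.zip_cons_cons, List.map_cons, pvGl]
      rw [← ih b]

theorem pvGlFold (rest : List Int) : ∀ (a acc : Int),
    (pvGl a rest).foldl max acc = if rest = [] then acc else max acc (pvMaxGaps a rest) := by
  induction rest with
  | nil => intro a acc; simp [pvGl]
  | cons b r ih =>
      intro a acc
      simp only [pvGl, List.foldl]
      rw [ih b (max acc (b - a)), if_neg (show ¬(b :: r = []) by simp), pvMaxGaps_cons]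
      split_ifs <;> omega

theorem pvMaxGl (rest : List Int) (a : Int) (h : rest ≠ []) :
    (PySem.List.max? (pvGl a rest) (fun v => v)).getD 0 = pvMaxGaps a rest := by
  cases rest with
  | nil => exact absurd rfl h
  | cons b r =>
      simp only [pvGl]
      rw [PySem.List.max?_id_cons]
      simp only [Option.getD_some]
      rw [pvGlFold r b (b - a), pvMaxGaps_cons]

-- A's range fold, rewritten over the adjacent-pair list
theorem pvFoldl_port_map (s : List Int) (l : List Int) :
    ∀ st : Int × Int,
    l.foldl (fun (st : Int × Int) i =>
        let curr_sum : Int :=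
          if PySem.List.pyGetD s (i - 1) 0 + 1 = PySem.List.pyGetD s i 0
          then st.2 + 1 else 1
        (max st.1 curr_sum, curr_sum)) st
      = (l.map (fun j => (PySem.List.pyGetD s (j - 1) 0, PySem.List.pyGetD s j 0))).foldl
          (fun (st : Int × Int) (p : Int × Int) =>
            let c : Int := if p.1 + 1 = p.2 then st.2 + 1 else 1
            (max st.1 c, c)) st := by
  induction l with
  | nil => intro st; rfl
  | cons j l ih => intro st; simp only [List.foldl, List.map]; exact ih _

theorem pvRange_shift (a b : Int) :
    PySem.List.pyRange (a + 1) (b + 1) 1 = (PySem.List.pyRange a b 1).map (· + 1) := by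
  by_cases h : b ≤ a
  · rw [PySem.List.pyRange_one_eq_nil (by omega), PySem.List.pyRange_one_eq_nil h]
    rfl
  · have hlt : a < b := by omega
    rw [PySem.List.pyRange_one_cons (by omega : a + 1 < b + 1), PySem.List.pyRange_one_cons hlt]
    simp only [List.map]
    rw [pvRange_shift (a + 1) b]
termination_by (b - a).toNat
decreasing_by omega

theorem pvZip_dropLast (t : List Int) : ∀ x : Int,
    ((x :: t).dropLast).zip t = (x :: t).zip t := by
  induction t with
  | nil => intro x; rfl
  | cons y t' ih =>
      intro x
      have hdl : (x :: y :: t').dropLast = x :: (y :: t').dropLast := rfl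
      rw [hdl]
      simp only [List.zip_cons_cons]
      rw [ih y]

-- the adjacent-pair list produced by the range indices
theorem pvPairs_eq (s : List Int) :
    (PySem.List.pyRange 1 (s.length : Int) 1).map
        (fun j => (PySem.List.pyGetD s (j - 1) 0, PySem.List.pyGetD s j 0))
      = s.dropLast.zip (s.drop 1) := by
  cases hsnil : s with
  | nil => simp [PySem.List.pyRange_one_eq_nil]
  | cons x0 t0 =>
  rw [← hsnil]
  have hslen : 1 ≤ s.length := by rw [hsnil]; simp
  have h2 : (PySem.List.pyRange 1 (s.length : Int) 1).map
      (fun j => PySem.List.pyGetD s j 0) = s.drop 1 := by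
    have := PySem.List.map_pyGetD_pyRange' s (0:Int) (a := 1) (by omega)
    simpa using this
  have hlen : ((s.dropLast.length : Int)) = (s.length : Int) - 1 := by
    rw [List.length_dropLast]
    push_cast [Nat.cast_sub hslen]
    ring
  have h1 : (PySem.List.pyRange 1 (s.length : Int) 1).map
      (fun j => PySem.List.pyGetD s (j - 1) 0) = s.dropLast := by
    have hsh : PySem.List.pyRange 1 (s.length : Int) 1
        = (PySem.List.pyRange 0 ((s.length : Int) - 1) 1).map (· + 1) := by
      have := pvRange_shift 0 ((s.length : Int) - 1)
      norm_num at this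
      exact this
    rw [hsh, List.map_map]
    have hcongr : ∀ j ∈ PySem.List.pyRange 0 ((s.length : Int) - 1) 1,
        ((fun j => PySem.List.pyGetD s (j - 1) 0) ∘ (· + 1)) j
          = (fun j => PySem.List.pyGetD s.dropLast j 0) j := by
      intro j hj
      have hj' := (PySem.List.mem_pyRange_one.mp hj)
      simp only [Function.comp]
      have hb : j + 1 - 1 = j := by omega
      rw [hb]
      have hdllen : j < (s.dropLast.length : Int) := by omega
      rw [PySem.List.pyGetD_eq_getElem s 0 hj'.1 (by omega),
          PySem.List.pyGetD_eq_getElem s.dropLast 0 hj'.1 hdllen]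
      rw [List.getElem_dropLast]
    rw [List.map_congr_left hcongr, ← hlen]
    exact PySem.List.map_pyGetD_pyRange_zero' s.dropLast 0
  rw [← h1, ← h2, List.zip_map']

-- Port A on a non-empty sorted list, as pvMg of the flag list
theorem pvPortA_eq (arr : List Int) (x : Int) (t : List Int)
    (hse : PySem.List.sorted arr (fun x => x) false = x :: t) :
    longest_subsequence_naive arr = pvMg 1 (((x :: t).zip t).map pvFlag) := by
  unfold longest_subsequence_naive
  dsimp only
  rw [hse]
  rw [pvFoldl_port_map (x :: t), pvPairs_eq (x :: t)]
  simp only [List.drop_one, List.tail_cons]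
  rw [pvZip_dropLast t x]
  have hmap :
      (((x :: t).zip t)).foldl
        (fun (st : Int × Int) (p : Int × Int) =>
          let c : Int := if p.1 + 1 = p.2 then st.2 + 1 else 1
          (max st.1 c, c)) ((1 : Int), (1 : Int))
      = ((((x :: t).zip t)).map pvFlag).foldl
          (fun (st : Int × Int) b =>
            let c : Int := if b then 1 else st.2 + 1
            (max st.1 c, c)) ((1 : Int), (1 : Int)) := by
    rw [List.foldl_map]
    apply PySem.List.foldl_congr_mem
    intro acc p _
    by_cases h : p.1 + 1 = p.2
    · have hf : pvFlag p = false := by simp [pvFlag]; omega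
      simp [h, hf]
    · have hf : pvFlag p = true := by simp [pvFlag]; omega
      simp [h, hf]
  rw [hmap]
  rw [pvL1 _ 1 1 (by omega) (by omega)]
  have := pvMg_ge (((x :: t).zip t).map pvFlag) 1
  omega

-- Port B on a non-empty sorted list, as pvMaxGaps of the break positions
theorem pvPortB_eq (arr : List Int) (x : Int) (t : List Int)
    (hse : PySem.List.sorted arr (fun x => x) false = x :: t) :
    longest_subsequence_naive_alt arr
      = pvMaxGaps 0 (pvBreaks (((x :: t).zip t).map pvFlag) 1
          ++ [1 + ((((x :: t).zip t).map pvFlag).length : Int)]) := by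
  unfold longest_subsequence_naive_alt
  dsimp only
  rw [hse]
  have hbllen : (((x :: t).zip t).map pvFlag).length = t.length := by
    simp [List.length_zip]
  have hslen : (((x :: t).length : Nat) : Int)
      = 1 + ((((x :: t).zip t).map pvFlag).length : Int) := by
    rw [hbllen]; push_cast [List.length_cons]; omega
  rw [hslen]
  have hfil : (PySem.List.pyRange 1 (1 + ((((x :: t).zip t).map pvFlag).length : Int)) 1).filter
      (fun i => !(PySem.List.pyGetD (x :: t) i 0 - PySem.List.pyGetD (x :: t) (i - 1) 0 == 1))
      = pvBreaks (((x :: t).zip t).map pvFlag) 1 := by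
    have := pvFilterBreaks (((x :: t).zip t).map pvFlag) 1
      (fun i => !(PySem.List.pyGetD (x :: t) i 0 - PySem.List.pyGetD (x :: t) (i - 1) 0 == 1))
      (by
        intro k hk
        have hk' : k < t.length := by rwa [hbllen] at hk
        have hks : k + 1 < (x :: t).length := by simp only [List.length_cons]; omega
        have hget1 : PySem.List.pyGetD (x :: t) (1 + (k : Int)) 0 = (x :: t)[k + 1] := by
          rw [show (1 : Int) + (k : Int) = ((k + 1 : Nat) : Int) by push_cast; omega]
          rw [PySem.List.pyGetD_eq_getElem (x :: t) 0 (by positivity) (by push_cast [List.length_cons]; omega)]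
          simp
        have hget0' : PySem.List.pyGetD (x :: t) (1 + (k : Int) - 1) 0
            = (x :: t)[k]'(by simp only [List.length_cons]; omega) := by
          rw [show (1 : Int) + (k : Int) - 1 = ((k : Nat) : Int) by omega]
          rw [PySem.List.pyGetD_eq_getElem (x :: t) 0 (by positivity) (by push_cast [List.length_cons]; omega)]
          simp
        simp only [hget1, hget0']
        simp only [List.getElem_map, List.getElem_zip]
        have he1 : (x :: t)[k + 1]'hks = t[k]'hk' := by
          simp
        rw [he1]
        simp only [pvFlag]
        by_cases h : t[k]'hk' - (x :: t)[k]'(by simp only [List.length_cons]; omega) = 1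
        · simp [h]
        · simp [h])
    exact this
  rw [hfil]
  have hcuts : ([(0 : Int)] ++ pvBreaks (((x :: t).zip t).map pvFlag) 1
        ++ [1 + ((((x :: t).zip t).map pvFlag).length : Int)])
      = (0 : Int) :: (pvBreaks (((x :: t).zip t).map pvFlag) 1
        ++ [1 + ((((x :: t).zip t).map pvFlag).length : Int)]) := by simp
  rw [hcuts, PySem.List.slice_from_one]
  simp only [List.tail_cons]
  rw [pvZipGl]
  rw [pvMaxGl _ 0 (by simp)]

-- final assembly
theorem pvMain (arr : List Int) (h : arr ≠ []) :
    longest_subsequence_naive arr = longest_subsequence_naive_alt arr := by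
  cases hse : PySem.List.sorted arr (fun x => x) false with
  | nil =>
      exact absurd ((PySem.List.sorted_eq_nil_iff arr (fun x => x) false).mp hse) h
  | cons x t =>
      rw [pvPortA_eq arr x t hse, pvPortB_eq arr x t hse]
      have := pvL2 (((x :: t).zip t).map pvFlag) 0 1
      simpa using this

-- ===== VERDICT (by name: the statement is the Claim_ definition above) =====
theorem longest_subsequence_naive_spec : Claim_equal_longest_subsequence_naive := by
  intro arr _ hpre
  unfold Spec_longest_subsequence_naive
  exact pvMain arr hpre
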